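-- pv_equiv track=rewrite | github.com/GaelPouxMedard/InterRate | InterRate.py | getICData
-- ===== SOURCE A (Python) =====
-- def getICData(training, test):
--     for u in training:
--         training[u] = sorted(training[u], key=lambda x: x[1])
--         toRem = []
--         for i in range(len(training[u])):
--             if training[u][i][0] != training[u][-1][0]:
--                 toRem.append(training[u][i])
--         for tup in toRem:
--             training[u].remove(tup)
--
--     setInfs = set()
--     keysTraining = list(training.keys())
--     for u in keysTraining:
--         if len(training[u])<=1:
--             del training[u]
--             continue
--         for (c,t,s) in training[u]:
--             setInfs.add(c)
--
--     obsUsrTr = getObsUsr(training)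
--     obsUsrTe = getObsUsr(test)
--
--     return training, test, obsUsrTr, obsUsrTe
--
-- def getObsUsr(obs):
--     obsUsr={}
--     for c in obs:
--         for (u, t, s) in obs[c]:
--             try:
--                 obsUsr[u].append((c, t, s))
--             except:
--                 obsUsr[u]=[(c, t, s)]
--
--     return obsUsr
-- ===== SOURCE B (Python) =====
-- # B: one pass per user that groups events by campaign and tracks the winning
-- # campaign (max time, ties to the later event) instead of sort-then-remove;
-- # like A it mutates `training` in place and the equivalence is about the return value.
-- def getICData(training, test):
--     for u in list(training):
--         groups = {}
--         best = None  # (t, c) of the max-t event seen so far, ties -> later event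
--         for (c, t, s) in training[u]:
--             groups.setdefault(c, []).append((c, t, s))
--             if best is None or best[0] <= t:
--                 best = (t, c)
--         kept = [] if best is None else sorted(groups[best[1]], key=lambda x: x[1])
--         if len(kept) <= 1:
--             del training[u]
--         else:
--             training[u] = kept
--     return training, test, _obsByUser(training), _obsByUser(test)
--
-- def _obsByUser(obs):
--     res = {}
--     for c, events in obs.items():
--         for (u, t, s) in events:
--             res.setdefault(u, []).append((c, t, s))
--     return res
-- ===== Notes on version B (the rewrite author's own statement) =====
-- stated objective: alternative
-- what changed: Per user, A sorts all events and then removes the off-campaign ones with a quadratic list.remove loop keyed to the last sorted element; B makes one grouping pass (dict campaign -> events) while tracking the running last-argmax of the event time, then sorts only the winning group, and the user->observations transpose is a plain setdefault/append loop instead of try/except.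
import Mathlib
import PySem

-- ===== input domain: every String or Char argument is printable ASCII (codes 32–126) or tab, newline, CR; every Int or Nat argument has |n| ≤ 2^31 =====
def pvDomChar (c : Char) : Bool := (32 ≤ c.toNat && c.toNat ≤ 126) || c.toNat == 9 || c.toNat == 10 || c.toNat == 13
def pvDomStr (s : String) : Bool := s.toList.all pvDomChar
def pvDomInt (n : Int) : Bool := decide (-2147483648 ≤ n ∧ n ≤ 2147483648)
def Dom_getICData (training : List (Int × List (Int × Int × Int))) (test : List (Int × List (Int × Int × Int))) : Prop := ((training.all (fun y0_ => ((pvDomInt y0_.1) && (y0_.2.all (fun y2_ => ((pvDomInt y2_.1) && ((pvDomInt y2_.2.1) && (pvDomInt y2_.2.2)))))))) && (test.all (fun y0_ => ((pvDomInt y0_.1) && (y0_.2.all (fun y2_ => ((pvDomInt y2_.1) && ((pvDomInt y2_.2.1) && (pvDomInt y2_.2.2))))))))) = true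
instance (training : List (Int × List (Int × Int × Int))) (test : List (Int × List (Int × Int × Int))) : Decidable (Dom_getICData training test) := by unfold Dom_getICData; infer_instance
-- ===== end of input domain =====

-- B replaces A's sort-then-quadratic-remove per user by one grouping pass plus a running
-- last-argmax of the event time (objective: alternative decomposition, same results);
-- like A it consumes its dict arguments (A mutates `training` in place in Python, B does the
-- same mutation), and the equivalence proved here is about the RETURN value.

-- ===== PORT A =====
-- per-user body of A's first loop: sort by time, collect events whose campaign differs
-- from the last event's campaign, and remove them one by one
-- training[u][i] / training[u][-1]: i < len(L) always, and [-1] is only evaluated when the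
-- loop body runs (L ≠ []), so the pyGetD defaults are unreachable — exact.
def pvToRemA (L : List (Int × Int × Int)) : List (Int × Int × Int) :=
  (PySem.List.pyRange 0 (PySem.List.len L)).foldl
    (fun acc i =>
      if (PySem.List.pyGetD L i (0, 0, 0)).1 ≠ (PySem.List.pyGetD L (-1) (0, 0, 0)).1
      then acc ++ [PySem.List.pyGetD L i (0, 0, 0)] else acc) []

-- training[u].remove(tup): every tup was taken from the list, so ValueError (none) is unreachable — `.getD cur` is exact.
def pvUserStepA (L0 : List (Int × Int × Int)) : List (Int × Int × Int) :=
  (pvToRemA (PySem.List.sorted L0 (fun x => x.2.1))).foldl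
    (fun cur tup => (PySem.List.remove? cur tup).getD cur)
    (PySem.List.sorted L0 (fun x => x.2.1))

-- `for u in training: training[u] = …` (keys unchanged while iterating)
def pvPhase1A (d : PySem.Dict Int (List (Int × Int × Int))) : PySem.Dict Int (List (Int × Int × Int)) :=
  d.keys.foldl (fun d u => d.insert u (pvUserStepA (d.getD u []))) d

-- second loop: delete singleton users, otherwise collect campaigns into setInfs
def pvPhase2A (d : PySem.Dict Int (List (Int × Int × Int))) :
    PySem.Dict Int (List (Int × Int × Int)) × PySem.Set Int :=
  d.keys.foldl (fun st u =>
    if (st.1.getD u []).length ≤ 1 then (st.1.erase u, st.2)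
    else (st.1, (st.1.getD u []).foldl (fun s e => PySem.Set.add s e.1) st.2))
    (d, PySem.Set.empty)

def getObsUsr (obs : PySem.Dict Int (List (Int × Int × Int))) : PySem.Dict Int (List (Int × Int × Int)) :=
  obs.keys.foldl (fun obsUsr c =>
    (obs.getD c []).foldl (fun ou e =>
      if ou.contains e.1
      then ou.modify e.1 [] (fun l => l ++ [(c, e.2.1, e.2.2)])   -- try: obsUsr[u].append((c,t,s))
      else ou.insert e.1 [(c, e.2.1, e.2.2)]) obsUsr)             -- except: obsUsr[u] = [(c,t,s)]
    PySem.Dict.empty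

-- the Python arguments are dicts (assoc-list convention: Dict.ofList = Python dict construction)
def getICData (training : List (Int × List (Int × Int × Int))) (test : List (Int × List (Int × Int × Int))) : (List (Int × List (Int × Int × Int))) × (List (Int × List (Int × Int × Int))) × (List (Int × List (Int × Int × Int))) × (List (Int × List (Int × Int × Int))) :=
  ((pvPhase2A (pvPhase1A (PySem.Dict.ofList training))).1.items,
   (PySem.Dict.ofList test).items,
   (getObsUsr (pvPhase2A (pvPhase1A (PySem.Dict.ofList training))).1).items,
   (getObsUsr (PySem.Dict.ofList test)).items)

-- ===== PORT B =====
-- one pass: group the user's events by campaign and track (t, c) of the max-t event, ties to the later one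
-- `if best is None or best[0] <= t: best = (t, c)`
def pvBestStep (o : Option (Int × Int)) (e : Int × Int × Int) : Option (Int × Int) :=
  match o with
  | none => some (e.2.1, e.1)
  | some b => if b.1 ≤ e.2.1 then some (e.2.1, e.1) else some b

def pvScanB (evs : List (Int × Int × Int)) :
    PySem.Dict Int (List (Int × Int × Int)) × Option (Int × Int) :=
  evs.foldl (fun st e =>
    (st.1.modify e.1 [] (fun l => l ++ [e]),      -- groups.setdefault(c, []).append((c,t,s))
     pvBestStep st.2 e))
    (PySem.Dict.empty, none)

def pvUserStepB (L : List (Int × Int × Int)) : List (Int × Int × Int) :=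
  match (pvScanB L).2 with
  | none => []
  | some b => PySem.List.sorted ((pvScanB L).1.getD b.2 []) (fun x => x.2.1)   -- groups[best[1]] is always a key — getD exact

def pvObsByUser (obs : PySem.Dict Int (List (Int × Int × Int))) : PySem.Dict Int (List (Int × Int × Int)) :=
  obs.items.foldl (fun res p =>
    p.2.foldl (fun r e => r.modify e.1 [] (fun l => l ++ [(p.1, e.2.1, e.2.2)])) res)
    PySem.Dict.empty

-- `if len(kept) <= 1: del training[u] else: training[u] = kept`
def pvPhaseB (d : PySem.Dict Int (List (Int × Int × Int))) : PySem.Dict Int (List (Int × Int × Int)) :=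
  d.keys.foldl (fun d u =>
    if (pvUserStepB (d.getD u [])).length ≤ 1 then d.erase u
    else d.insert u (pvUserStepB (d.getD u []))) d

def getICData_alt (training : List (Int × List (Int × Int × Int))) (test : List (Int × List (Int × Int × Int))) : (List (Int × List (Int × Int × Int))) × (List (Int × List (Int × Int × Int))) × (List (Int × List (Int × Int × Int))) × (List (Int × List (Int × Int × Int))) :=
  ((pvPhaseB (PySem.Dict.ofList training)).items,
   (PySem.Dict.ofList test).items,
   (pvObsByUser (pvPhaseB (PySem.Dict.ofList training))).items,
   (pvObsByUser (PySem.Dict.ofList test)).items)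

-- ===== PRECONDITION & SPEC =====
def Spec_getICData (training : List (Int × List (Int × Int × Int))) (test : List (Int × List (Int × Int × Int))) (out : (List (Int × List (Int × Int × Int))) × (List (Int × List (Int × Int × Int))) × (List (Int × List (Int × Int × Int))) × (List (Int × List (Int × Int × Int)))) : Prop := out = getICData_alt training test
instance (training : List (Int × List (Int × Int × Int))) (test : List (Int × List (Int × Int × Int))) (out : (List (Int × List (Int × Int × Int))) × (List (Int × List (Int × Int × Int))) × (List (Int × List (Int × Int × Int))) × (List (Int × List (Int × Int × Int)))) : Decidable (Spec_getICData training test out) := by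
  unfold Spec_getICData
  have I : DecidableEq (List (Int × List (Int × Int × Int))) := inferInstance
  exact @instDecidableEqProd _ _ I (@instDecidableEqProd _ _ I (@instDecidableEqProd _ _ I I)) _ _

-- ===== CLAIM (what is proved, stated in full; the proofs are below) =====
def Claim_equal_getICData : Prop := ∀ (training : List (Int × List (Int × Int × Int))) (test : List (Int × List (Int × Int × Int))), Dom_getICData training test → Spec_getICData training test (getICData training test)


-- ===== LEMMAS AND PROOFS =====

-- ---- generic list lemmas about insertion sort (A's sorted) ----

theorem pv_insertBy_nil {α : Type} (before : α → α → Bool) (x : α) :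
    PySem.List.insertBy before x [] = [x] := by simp [PySem.List.insertBy]

theorem pv_insertBy_cons {α : Type} (before : α → α → Bool) (x y : α) (ys : List α) :
    PySem.List.insertBy before x (y :: ys) =
      if before x y then x :: y :: ys else y :: PySem.List.insertBy before x ys := by
  simp [PySem.List.insertBy]

-- inserting into a key-sorted list keeps it key-sorted
theorem pv_insertBy_pairwise (key : (Int × Int × Int) → Int) (x : Int × Int × Int)
    (ys : List (Int × Int × Int))
    (h : List.Pairwise (fun a b => key a ≤ key b) ys) :
    List.Pairwise (fun a b => key a ≤ key b)
      (PySem.List.insertBy (fun a b => decide (key a < key b)) x ys) := by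
  induction ys with
  | nil => simp [pv_insertBy_nil]
  | cons y ys ih =>
    rw [List.pairwise_cons] at h
    rw [pv_insertBy_cons]
    by_cases hb : key x < key y
    · simp only [hb, decide_true, if_true]
      refine List.pairwise_cons.mpr ⟨?_, List.pairwise_cons.mpr h⟩
      intro z hz
      rcases List.mem_cons.mp hz with rfl | hz
      · omega
      · have := h.1 z hz; omega
    · simp only [hb, decide_false]
      refine List.pairwise_cons.mpr ⟨?_, ih h.2⟩
      intro z hz
      rcases (PySem.List.mem_insertBy _ _ _ _).mp hz with rfl | hz
      · omega
      · exact h.1 z hz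

-- the last element of insertBy
theorem pv_getLast?_insertBy {α : Type} (before : α → α → Bool) (x : α) (ys : List α) :
    (PySem.List.insertBy before x ys).getLast? =
      if ys.all (fun y => !before x y) then some x else ys.getLast? := by
  induction ys with
  | nil => simp [pv_insertBy_nil]
  | cons y ys ih =>
    rw [pv_insertBy_cons]
    by_cases hb : before x y
    · simp [hb, List.getLast?_cons_cons]
    · have hne : PySem.List.insertBy before x ys ≠ [] :=
        List.ne_nil_of_mem ((PySem.List.mem_insertBy before x x ys).mpr (Or.inl rfl))
      obtain ⟨z, t, hzt⟩ := List.exists_cons_of_ne_nil hne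
      simp only [hb, Bool.false_eq_true, if_false]
      rw [show (y :: PySem.List.insertBy before x ys).getLast? = (PySem.List.insertBy before x ys).getLast? by
        rw [hzt]; exact List.getLast?_cons_cons, ih]
      cases hall : ys.all (fun y => !before x y) with
      | true => simp [hall, List.all_cons, hb]
      | false =>
        cases ys with
        | nil => simp at hall
        | cons w ws => simp [hall, List.all_cons, hb, List.getLast?_cons_cons]

-- in a key-sorted list, the last element has maximal key
theorem pv_last_max (key : (Int × Int × Int) → Int) (ys : List (Int × Int × Int))
    (h : List.Pairwise (fun a b => key a ≤ key b) ys) {b : Int × Int × Int}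
    (hb : ys.getLast? = some b) : ∀ y ∈ ys, key y ≤ key b := by
  obtain ⟨l', rfl⟩ := List.getLast?_eq_some_iff.mp hb
  rw [List.pairwise_append] at h
  intro y hy
  rcases List.mem_append.mp hy with hy | hy
  · simpa using h.2.2 y hy b (by simp)
  · have : y = b := by simpa using hy
    simp [this]

-- filtering commutes with a single stable insertion (sorted accumulator)
theorem pv_filter_insertBy (key : (Int × Int × Int) → Int) (p : (Int × Int × Int) → Bool)
    (x : Int × Int × Int) (ys : List (Int × Int × Int))
    (h : List.Pairwise (fun a b => key a ≤ key b) ys) :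
    (PySem.List.insertBy (fun a b => decide (key a < key b)) x ys).filter p =
      if p x then PySem.List.insertBy (fun a b => decide (key a < key b)) x (ys.filter p)
      else ys.filter p := by
  induction ys with
  | nil =>
    by_cases hp : p x <;> simp [pv_insertBy_nil, hp]
  | cons y ys ih =>
    rw [List.pairwise_cons] at h
    rw [pv_insertBy_cons]
    by_cases hb : key x < key y
    · simp only [hb, decide_true, if_true]
      by_cases hp : p x
      · by_cases hpy : p y
        · simp [hp, hpy, pv_insertBy_cons, hb]
        · simp only [List.filter_cons, hp, hpy, if_true, if_false, Bool.false_eq_true]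
          cases hf : List.filter p ys with
          | nil => simp [pv_insertBy_nil]
          | cons z t =>
            have hz : z ∈ ys := List.mem_of_mem_filter (hf ▸ List.mem_cons_self)
            have : key x < key z := lt_of_lt_of_le hb (h.1 z hz)
            simp [pv_insertBy_cons, this]
      · simp [List.filter_cons, hp]
    · simp only [hb, decide_false]
      by_cases hp : p x
      · by_cases hpy : p y
        · simp [hpy, ih h.2, hp, pv_insertBy_cons, hb]
        · simp [hpy, ih h.2, hp]
      · by_cases hpy : p y
        · simp [hpy, ih h.2, hp]
        · simp [hpy, ih h.2, hp]

-- filtering commutes with stable sorting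
theorem pv_filter_sorted (key : (Int × Int × Int) → Int) (p : (Int × Int × Int) → Bool)
    (L : List (Int × Int × Int)) :
    (PySem.List.sorted L key).filter p = PySem.List.sorted (L.filter p) key := by
  have aux : ∀ (L acc : List (Int × Int × Int)),
      List.Pairwise (fun a b => key a ≤ key b) acc →
      (L.foldl (fun acc x => PySem.List.insertBy (fun a b => decide (key a < key b)) x acc) acc).filter p
        = (L.filter p).foldl (fun acc x => PySem.List.insertBy (fun a b => decide (key a < key b)) x acc) (acc.filter p) := by
    intro L
    induction L with
    | nil => intro acc _; rfl
    | cons x L ih =>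
      intro acc hacc
      have h1 := ih _ (pv_insertBy_pairwise key x acc hacc)
      rw [List.foldl_cons, h1, pv_filter_insertBy key p x acc hacc]
      by_cases hp : p x <;> simp [hp]
  rw [PySem.List.sorted_eq_foldl_insertBy, PySem.List.sorted_eq_foldl_insertBy]
  simpa using aux L [] List.Pairwise.nil

-- the last element of the stable sort is the running last-argmax of the key
theorem pv_getLast?_sorted (key : (Int × Int × Int) → Int) (L : List (Int × Int × Int)) :
    (PySem.List.sorted L key).getLast? =
      L.foldl (fun o e => match o with
        | none => some e
        | some b => if key b ≤ key e then some e else some b) none := by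
  have aux : ∀ (L acc : List (Int × Int × Int)),
      List.Pairwise (fun a b => key a ≤ key b) acc →
      (L.foldl (fun acc x => PySem.List.insertBy (fun a b => decide (key a < key b)) x acc) acc).getLast?
        = L.foldl (fun o e => match o with
            | none => some e
            | some b => if key b ≤ key e then some e else some b) acc.getLast? := by
    intro L
    induction L with
    | nil => intro acc _; rfl
    | cons x L ih =>
      intro acc hacc
      rw [List.foldl_cons, ih _ (pv_insertBy_pairwise key x acc hacc), List.foldl_cons]
      congr 1
      rw [pv_getLast?_insertBy]
      cases hacc2 : acc.getLast? with
      | none =>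
        have : acc = [] := List.getLast?_eq_none_iff.mp hacc2
        subst this; rfl
      | some b =>
        have hmem : b ∈ acc := List.mem_of_getLast? hacc2
        have hmax := pv_last_max key acc hacc hacc2
        by_cases hxb : key b ≤ key x
        · have : acc.all (fun y => !decide (key x < key y)) = true := by
            rw [List.all_eq_true]
            intro y hy
            have := hmax y hy
            simp; omega
          simp [this, hxb]
        · have : acc.all (fun y => !decide (key x < key y)) = false := by
            rw [List.all_eq_false]
            exact ⟨b, hmem, by simp; omega⟩
          simp [this, hxb]
  rw [PySem.List.sorted_eq_foldl_insertBy]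
  simpa using aux L [] List.Pairwise.nil

-- A's removal loop: removing exactly the p-elements of l from l leaves the ¬p-elements
theorem pv_remove_fold (p : (Int × Int × Int) → Bool) (l : List (Int × Int × Int)) :
    (l.filter p).foldl (fun cur t => (PySem.List.remove? cur t).getD cur) l =
      l.filter (fun x => !p x) := by
  have hcons : ∀ (ts : List (Int × Int × Int)) (x : Int × Int × Int) (l : List (Int × Int × Int)),
      (∀ t ∈ ts, t ≠ x) →
      ts.foldl (fun cur t => (PySem.List.remove? cur t).getD cur) (x :: l)
        = x :: ts.foldl (fun cur t => (PySem.List.remove? cur t).getD cur) l := by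
    intro ts
    induction ts with
    | nil => intro x l _; rfl
    | cons t ts ih =>
      intro x l hne
      rw [List.foldl_cons, List.foldl_cons]
      have hstep : (PySem.List.remove? (x :: l) t).getD (x :: l)
          = x :: (PySem.List.remove? l t).getD l := by
        have hxt : (x == t) = false := by
          simp only [beq_eq_false_iff_ne]
          exact fun h => hne t List.mem_cons_self h.symm
        simp only [PySem.List.remove?, List.idxOf?_cons, hxt, Bool.false_eq_true, if_false]
        cases hr : List.idxOf? t l with
        | none => simp
        | some k => simp [List.eraseIdx_cons_succ]
      rw [hstep]
      exact ih x _ (fun t' ht' => hne t' (List.mem_cons_of_mem _ ht'))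
  induction l with
  | nil => rfl
  | cons x l ih =>
    by_cases hp : p x
    · rw [List.filter_cons_of_pos hp, List.foldl_cons]
      have : (PySem.List.remove? (x :: l) x).getD (x :: l) = l := by
        simp [PySem.List.remove?, List.idxOf?_cons]
      rw [this, ih, List.filter_cons_of_neg (by simp [hp])]
    · rw [List.filter_cons_of_neg hp]
      have hne : ∀ t ∈ l.filter p, t ≠ x := by
        intro t ht heq
        subst heq
        exact hp (List.of_mem_filter ht)
      rw [hcons _ x l hne, ih, List.filter_cons_of_pos (by simp [hp])]

-- negative-one indexing is getLast
theorem pv_pyGetD_neg_one {α : Type} (xs : List α) (d a : α) (h : xs.getLast? = some a) :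
    PySem.List.pyGetD xs (-1) d = a := by
  obtain ⟨ys, rfl⟩ := List.getLast?_eq_some_iff.mp h
  have hlen : (ys ++ [a]).length = ys.length + 1 := by simp
  simp only [PySem.List.pyGetD, PySem.List.pyGet?, PySem.List.pyIdx?, hlen]
  rw [if_neg (by norm_num), if_pos (by push_cast; omega)]
  have : ys.length + 1 - (-(-1 : Int)).toNat = ys.length := by norm_num
  rw [this]
  simp

-- B's grouping dict, looked up at a campaign, is the filtered event list
theorem pv_group_getD (L : List (Int × Int × Int)) (c : Int) :
    (L.foldl (fun d e => d.modify e.1 [] (fun l => l ++ [e]))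
        (PySem.Dict.empty : PySem.Dict Int (List (Int × Int × Int)))).getD c []
      = L.filter (fun e => e.1 == c) := by
  have h1 : L.foldl (fun d e => d.modify e.1 [] (fun l => l ++ [e]))
        (PySem.Dict.empty : PySem.Dict Int (List (Int × Int × Int)))
      = (L.map (fun e => (e.1, e))).foldl (fun d p => d.modify p.1 [] (fun l => l ++ [p.2]))
          PySem.Dict.empty := by
    rw [List.foldl_map]
  rw [h1, PySem.Dict.getD_foldl_modify_append]
  simp [List.filter_map, Function.comp_def, List.map_map]

-- B's running best is (time, campaign) of the last element of the stable sort
theorem pv_best_eq (L : List (Int × Int × Int)) :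
    L.foldl pvBestStep none
      = ((PySem.List.sorted L (fun x => x.2.1)).getLast?).map (fun e => (e.2.1, e.1)) := by
  have gen : ∀ (M : List (Int × Int × Int)) (o : Option (Int × Int × Int)),
      M.foldl pvBestStep (o.map (fun e => (e.2.1, e.1)))
      = (M.foldl (fun o e => match o with
          | none => some e
          | some b => if b.2.1 ≤ e.2.1 then some e else some b) o).map (fun e => (e.2.1, e.1)) := by
    intro M
    induction M with
    | nil => intro o; rfl
    | cons x M ih =>
      intro o
      rw [List.foldl_cons, List.foldl_cons]
      cases o with
      | none => exact ih (some x)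
      | some b =>
        by_cases hc : b.2.1 ≤ x.2.1 <;>
          simp only [Option.map_some, pvBestStep, hc, if_true, if_false] <;>
          [exact ih (some x); exact ih (some b)]
  have h0 := gen L none
  simp only [Option.map_none] at h0
  rw [h0, pv_getLast?_sorted]

theorem pv_userStep_eq (L : List (Int × Int × Int)) : pvUserStepA L = pvUserStepB L := by
  by_cases hL : L = []
  · subst hL; rfl
  · have hS : PySem.List.sorted L (fun x : Int × Int × Int => x.2.1) ≠ [] := by
      intro h
      exact hL ((PySem.List.sorted_eq_nil_iff _ _ _).mp h)
    obtain ⟨last, hlast⟩ : ∃ a, (PySem.List.sorted L (fun x : Int × Int × Int => x.2.1)).getLast? = some a := by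
      cases h : (PySem.List.sorted L (fun x : Int × Int × Int => x.2.1)).getLast? with
      | none => exact absurd (List.getLast?_eq_none_iff.mp h) hS
      | some a => exact ⟨a, rfl⟩
    have hA : pvUserStepA L
        = (PySem.List.sorted L (fun x => x.2.1)).filter (fun e => !decide (e.1 ≠ last.1)) := by
      unfold pvUserStepA pvToRemA
      rw [PySem.List.foldl_pyRange_pyGetD (PySem.List.sorted L (fun x => x.2.1)) (0, 0, 0)
            (fun acc e => if e.1 ≠ (PySem.List.pyGetD (PySem.List.sorted L (fun x => x.2.1)) (-1) (0, 0, 0)).1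
                          then acc ++ [e] else acc) [] (le_refl (0 : Int))]
      rw [pv_pyGetD_neg_one _ _ _ hlast]
      simp only [Int.toNat_zero, List.drop_zero]
      rw [PySem.List.foldl_append_ite_eq_filter (fun e : Int × Int × Int => e.1 ≠ last.1)]
      simp only [List.nil_append]
      exact pv_remove_fold (fun e => decide (e.1 ≠ last.1)) _
    have hB : pvUserStepB L
        = PySem.List.sorted (L.filter (fun e => e.1 == last.1)) (fun x => x.2.1) := by
      unfold pvUserStepB pvScanB
      rw [PySem.List.foldl_prod_mk
            (f := fun (d : PySem.Dict Int (List (Int × Int × Int))) (e : Int × Int × Int) => d.modify e.1 [] (fun l => l ++ [e]))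
            (g := pvBestStep)]
      rw [pv_best_eq, hlast]
      simp only [Option.map_some]
      rw [pv_group_getD]
    rw [hA, hB, ← pv_filter_sorted]
    apply List.filter_congr
    intro x _
    by_cases hx : x.1 = last.1 <;> simp [hx]

-- ---- dictionary pipeline lemmas ----

-- a fold whose steps only touch keys ≠ u passes over a leading (u, w) entry
theorem pv_foldl_cons_peel (step : PySem.Dict Int (List (Int × Int × Int)) → Int → PySem.Dict Int (List (Int × Int × Int)))
    (u : Int) (w : List (Int × Int × Int)) (ks : List Int)
    (h : ∀ (t : List (Int × List (Int × Int × Int))) (k : Int), k ∈ ks →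
      step ⟨(u, w) :: t⟩ k = ⟨(u, w) :: (step ⟨t⟩ k).items⟩) :
    ∀ l, ks.foldl step ⟨(u, w) :: l⟩ = ⟨(u, w) :: (ks.foldl step ⟨l⟩).items⟩ := by
  induction ks with
  | nil => intro l; rfl
  | cons k ks ih =>
    intro l
    rw [List.foldl_cons, h l k List.mem_cons_self, List.foldl_cons]
    exact ih (fun t k' hk' => h t k' (List.mem_cons_of_mem _ hk')) ((step ⟨l⟩ k).items)

theorem pv_getD_mk_cons_ne (u k : Int) (w : List (Int × Int × Int))
    (t : List (Int × List (Int × Int × Int))) (hne : k ≠ u) :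
    PySem.Dict.getD ⟨(u, w) :: t⟩ k ([] : List (Int × Int × Int)) = PySem.Dict.getD ⟨t⟩ k [] := by
  have h1 : (u == k) = false := beq_eq_false_iff_ne.mpr (Ne.symm hne)
  simp [PySem.Dict.getD, PySem.Dict.get?_mk_cons, h1]

theorem pv_insert_mk_cons_ne (u k : Int) (w x : List (Int × Int × Int))
    (t : List (Int × List (Int × Int × Int))) (hne : k ≠ u) :
    PySem.Dict.insert ⟨(u, w) :: t⟩ k x = ⟨(u, w) :: (PySem.Dict.insert ⟨t⟩ k x).items⟩ := by
  have h1 : (u == k) = false := beq_eq_false_iff_ne.mpr (Ne.symm hne)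
  simp only [PySem.Dict.insert, PySem.Dict.contains_mk, List.any_cons, h1, Bool.false_or]
  by_cases hc : t.any (fun p => p.1 == k) <;> simp [hc, Ne.symm hne]

theorem pv_erase_mk_cons_ne (u k : Int) (w : List (Int × Int × Int))
    (t : List (Int × List (Int × Int × Int))) (hne : k ≠ u) :
    PySem.Dict.erase (⟨(u, w) :: t⟩ : PySem.Dict Int (List (Int × Int × Int))) k
      = ⟨(u, w) :: (PySem.Dict.erase (⟨t⟩ : PySem.Dict Int (List (Int × Int × Int))) k).items⟩ := by
  have h1 : (u == k) = false := beq_eq_false_iff_ne.mpr (Ne.symm hne)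
  simp [PySem.Dict.erase, h1]

-- phase 1 of A rewrites every user's list in place
theorem pv_phase1_char (l : List (Int × List (Int × Int × Int)))
    (hnd : (l.map Prod.fst).Nodup) :
    (l.map Prod.fst).foldl (fun d u => d.insert u (pvUserStepA (d.getD u []))) ⟨l⟩
      = (⟨l.map (fun p => (p.1, pvUserStepA p.2))⟩ : PySem.Dict Int (List (Int × Int × Int))) := by
  induction l with
  | nil => rfl
  | cons p l ih =>
    obtain ⟨u, v⟩ := p
    rw [List.map_cons, List.foldl_cons]
    rw [List.map_cons, List.nodup_cons] at hnd
    obtain ⟨hu, hnd'⟩ := hnd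
    have hget : PySem.Dict.getD (⟨(u, v) :: l⟩ : PySem.Dict Int (List (Int × Int × Int))) u [] = v := by
      simp [PySem.Dict.getD, PySem.Dict.get?_mk_cons]
    have hcont : PySem.Dict.contains (⟨(u, v) :: l⟩ : PySem.Dict Int (List (Int × Int × Int))) u = true := by
      simp [PySem.Dict.contains_mk]
    have hstep : PySem.Dict.insert (⟨(u, v) :: l⟩ : PySem.Dict Int (List (Int × Int × Int))) u
        (pvUserStepA (PySem.Dict.getD (⟨(u, v) :: l⟩ : PySem.Dict Int (List (Int × Int × Int))) u []))
        = ⟨(u, pvUserStepA v) :: l⟩ := by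
      rw [hget]
      simp only [PySem.Dict.insert, hcont, if_true, List.map_cons]
      have hhead : (if (((u, v) : Int × List (Int × Int × Int)).1 == u) = true
          then (u, pvUserStepA v) else (u, v)) = (u, pvUserStepA v) := by simp
      have htail : List.map (fun p => if (p.1 == u) = true then (u, pvUserStepA v) else p) l = l := by
        have hcg := List.map_congr_left (l := l)
          (f := fun p : Int × List (Int × Int × Int) => if (p.1 == u) = true then (u, pvUserStepA v) else p)
          (g := id) ?_
        · simpa using hcg
        · intro q hq
          have : q.1 ≠ u := by
            intro h
            apply hu
            have hq2 : q.1 ∈ List.map Prod.fst l := List.mem_map_of_mem (f := Prod.fst) hq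
            simpa [h] using hq2
          simp [this]
      rw [hhead, htail]
    rw [hstep]
    rw [pv_foldl_cons_peel _ u (pvUserStepA v) _ ?_ l]
    · rw [ih hnd']; rfl
    · intro t k hk
      have hne : k ≠ u := by
        intro h
        exact hu (h ▸ hk)
      rw [pv_getD_mk_cons_ne u k _ t hne, pv_insert_mk_cons_ne u k _ _ t hne]

-- the dict component of A's phase 2 ignores setInfs
theorem pv_phase2_proj (ks : List Int) (d : PySem.Dict Int (List (Int × Int × Int))) (s : PySem.Set Int) :
    (ks.foldl (fun st u =>
        if (st.1.getD u []).length ≤ 1 then (st.1.erase u, st.2)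
        else (st.1, (st.1.getD u []).foldl (fun s e => PySem.Set.add s e.1) st.2)) (d, s)).1
      = ks.foldl (fun d u => if (d.getD u []).length ≤ 1 then d.erase u else d) d := by
  induction ks generalizing d s with
  | nil => rfl
  | cons k ks ih =>
    rw [List.foldl_cons, List.foldl_cons]
    by_cases hc : (d.getD k []).length ≤ 1 <;> simp only [hc, if_true, if_false] <;> exact ih _ _

-- phase 2 of A keeps exactly the entries with more than one event
theorem pv_phase2_char (l : List (Int × List (Int × Int × Int)))
    (hnd : (l.map Prod.fst).Nodup) :
    (l.map Prod.fst).foldl (fun d u => if (d.getD u []).length ≤ 1 then d.erase u else d) ⟨l⟩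
      = (⟨l.filter (fun p => decide (1 < p.2.length))⟩ : PySem.Dict Int (List (Int × Int × Int))) := by
  induction l with
  | nil => rfl
  | cons p l ih =>
    obtain ⟨u, v⟩ := p
    rw [List.map_cons, List.foldl_cons]
    rw [List.map_cons, List.nodup_cons] at hnd
    obtain ⟨hu, hnd'⟩ := hnd
    have hget : PySem.Dict.getD (⟨(u, v) :: l⟩ : PySem.Dict Int (List (Int × Int × Int))) u [] = v := by
      simp [PySem.Dict.getD, PySem.Dict.get?_mk_cons]
    by_cases hlen : v.length ≤ 1
    · simp only [hget, hlen, if_true]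
      have herase : PySem.Dict.erase (⟨(u, v) :: l⟩ : PySem.Dict Int (List (Int × Int × Int))) u = ⟨l⟩ := by
        simp only [PySem.Dict.erase, List.filter_cons]
        have : (!((u, v) : Int × List (Int × Int × Int)).1 == u) = false := by simp
        rw [this, if_neg (by simp)]
        congr 1
        rw [List.filter_eq_self]
        intro q hq
        have : q.1 ≠ u := by
          intro h
          apply hu
          have hq2 : q.1 ∈ List.map Prod.fst l := List.mem_map_of_mem (f := Prod.fst) hq
          simpa [h] using hq2
        simp [this]
      rw [herase, ih hnd', List.filter_cons]
      have : decide (1 < v.length) = false := by simp; omega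
      rw [this, if_neg (by simp)]
    · simp only [hget, hlen, if_false]
      rw [pv_foldl_cons_peel _ u v _ ?_ l]
      · rw [ih hnd', List.filter_cons]
        have : decide (1 < v.length) = true := by simp; omega
        rw [this, if_pos rfl]
      · intro t k hk
        have hne : k ≠ u := fun h => hu (h ▸ hk)
        rw [pv_getD_mk_cons_ne u k _ t hne]
        by_cases hc : (PySem.Dict.getD (⟨t⟩ : PySem.Dict Int (List (Int × Int × Int))) k []).length ≤ 1
        · simp only [hc, if_true]
          exact pv_erase_mk_cons_ne u k v t hne
        · simp only [hc, if_false]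

-- B's single fold, characterised
theorem pv_phaseB_char (l : List (Int × List (Int × Int × Int)))
    (hnd : (l.map Prod.fst).Nodup) :
    (l.map Prod.fst).foldl (fun d u =>
        if (pvUserStepB (d.getD u [])).length ≤ 1 then d.erase u
        else d.insert u (pvUserStepB (d.getD u []))) ⟨l⟩
      = (⟨l.filterMap (fun p =>
            if (pvUserStepB p.2).length ≤ 1 then none else some (p.1, pvUserStepB p.2))⟩ :
          PySem.Dict Int (List (Int × Int × Int))) := by
  induction l with
  | nil => rfl
  | cons p l ih =>
    obtain ⟨u, v⟩ := p
    rw [List.map_cons, List.foldl_cons]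
    rw [List.map_cons, List.nodup_cons] at hnd
    obtain ⟨hu, hnd'⟩ := hnd
    have hget : PySem.Dict.getD (⟨(u, v) :: l⟩ : PySem.Dict Int (List (Int × Int × Int))) u [] = v := by
      simp [PySem.Dict.getD, PySem.Dict.get?_mk_cons]
    have hcont : PySem.Dict.contains (⟨(u, v) :: l⟩ : PySem.Dict Int (List (Int × Int × Int))) u = true := by
      simp [PySem.Dict.contains_mk]
    by_cases hlen : (pvUserStepB v).length ≤ 1
    · simp only [hget, hlen, if_true]
      have herase : PySem.Dict.erase (⟨(u, v) :: l⟩ : PySem.Dict Int (List (Int × Int × Int))) u = ⟨l⟩ := by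
        simp only [PySem.Dict.erase, List.filter_cons]
        have : (!((u, v) : Int × List (Int × Int × Int)).1 == u) = false := by simp
        rw [this, if_neg (by simp)]
        congr 1
        rw [List.filter_eq_self]
        intro q hq
        have : q.1 ≠ u := by
          intro h
          apply hu
          have hq2 : q.1 ∈ List.map Prod.fst l := List.mem_map_of_mem (f := Prod.fst) hq
          simpa [h] using hq2
        simp [this]
      rw [herase, ih hnd', List.filterMap_cons]
      simp only [hlen, if_true]
    · simp only [hget, hlen, if_false]
      have hstep : PySem.Dict.insert (⟨(u, v) :: l⟩ : PySem.Dict Int (List (Int × Int × Int))) u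
          (pvUserStepB v) = ⟨(u, pvUserStepB v) :: l⟩ := by
        simp only [PySem.Dict.insert, hcont, if_true, List.map_cons]
        have hhead : (if (((u, v) : Int × List (Int × Int × Int)).1 == u) = true
            then (u, pvUserStepB v) else (u, v)) = (u, pvUserStepB v) := by simp
        have htail : List.map (fun p => if (p.1 == u) = true then (u, pvUserStepB v) else p) l = l := by
          have hcg := List.map_congr_left (l := l)
            (f := fun p : Int × List (Int × Int × Int) => if (p.1 == u) = true then (u, pvUserStepB v) else p)
            (g := id) ?_
          · simpa using hcg
          · intro q hq
            have : q.1 ≠ u := by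
              intro h
              apply hu
              have hq2 : q.1 ∈ List.map Prod.fst l := List.mem_map_of_mem (f := Prod.fst) hq
              simpa [h] using hq2
            simp [this]
        rw [hhead, htail]
      rw [hstep]
      rw [pv_foldl_cons_peel _ u (pvUserStepB v) _ ?_ l]
      · rw [ih hnd', List.filterMap_cons]
        simp only [hlen, if_false]
      · intro t k hk
        have hne : k ≠ u := fun h => hu (h ▸ hk)
        rw [pv_getD_mk_cons_ne u k _ t hne]
        by_cases hc : (pvUserStepB (PySem.Dict.getD (⟨t⟩ : PySem.Dict Int (List (Int × Int × Int))) k [])).length ≤ 1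
        · simp only [hc, if_true]
          exact pv_erase_mk_cons_ne u k _ t hne
        · simp only [hc, if_false]
          exact pv_insert_mk_cons_ne u k _ _ t hne

-- the two transposes agree on nodup-key dicts
theorem pv_obs_eq (d : PySem.Dict Int (List (Int × Int × Int))) (hnd : d.keys.Nodup) :
    getObsUsr d = pvObsByUser d := by
  unfold getObsUsr pvObsByUser
  rw [PySem.Dict.items_eq_map_keys d hnd ([] : List (Int × Int × Int)), List.foldl_map]
  refine PySem.List.foldl_congr_mem _ _ _ _ ?_
  intro acc c _
  refine PySem.List.foldl_congr_mem _ _ _ _ ?_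
  intro ou e _
  by_cases hcont : ou.contains e.1
  · simp only [hcont, if_true]
  · simp only [hcont, Bool.false_eq_true, if_false, PySem.Dict.modify,
      PySem.Dict.getD_of_not_contains ou _ (by simpa using hcont), List.nil_append]

-- keeping the long entries of a rewritten dict, as one filterMap
theorem pv_map_filter_eq_filterMap (F : List (Int × Int × Int) → List (Int × Int × Int))
    (l : List (Int × List (Int × Int × Int))) :
    (l.map (fun p => (p.1, F p.2))).filter (fun p => decide (1 < p.2.length))
      = l.filterMap (fun p => if (F p.2).length ≤ 1 then none else some (p.1, F p.2)) := by
  induction l with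
  | nil => rfl
  | cons p l ih =>
    rw [List.map_cons, List.filter_cons, List.filterMap_cons]
    by_cases hlen : (F p.2).length ≤ 1
    · have hd : decide (1 < ((p.1, F p.2) : Int × List (Int × Int × Int)).2.length) = false := by
        simp only [decide_eq_false_iff_not, not_lt]
        simpa using hlen
      rw [hd, if_neg (by simp), if_pos hlen, ih]
    · have hd : decide (1 < ((p.1, F p.2) : Int × List (Int × Int × Int)).2.length) = true := by
        simp only [decide_eq_true_eq]
        simp at hlen ⊢
        omega
      rw [hd, if_pos rfl, if_neg hlen, ih]

-- ===== VERDICT (by name: the statement is the Claim_ definition above) =====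
theorem getICData_spec : Claim_equal_getICData := by
  intro training test _
  unfold Spec_getICData getICData getICData_alt
  have hndTr : (((PySem.Dict.ofList training : PySem.Dict Int (List (Int × Int × Int)))).items.map Prod.fst).Nodup :=
    PySem.Dict.nodup_keys_ofList training
  have hndTe : ((PySem.Dict.ofList test : PySem.Dict Int (List (Int × Int × Int)))).keys.Nodup :=
    PySem.Dict.nodup_keys_ofList test
  have h1 : pvPhase1A (PySem.Dict.ofList training)
      = (⟨(PySem.Dict.ofList training : PySem.Dict Int (List (Int × Int × Int))).items.map
            (fun p => (p.1, pvUserStepA p.2))⟩ : PySem.Dict Int (List (Int × Int × Int))) :=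
    pv_phase1_char _ hndTr
  have hnd2 : (((PySem.Dict.ofList training : PySem.Dict Int (List (Int × Int × Int))).items.map
      (fun p => (p.1, pvUserStepA p.2))).map Prod.fst).Nodup := by
    simpa [List.map_map, Function.comp_def] using hndTr
  have h2 : (pvPhase2A (pvPhase1A (PySem.Dict.ofList training))).1
      = (⟨((PySem.Dict.ofList training : PySem.Dict Int (List (Int × Int × Int))).items.map
            (fun p => (p.1, pvUserStepA p.2))).filter (fun p => decide (1 < p.2.length))⟩ :
          PySem.Dict Int (List (Int × Int × Int))) := by
    rw [h1]
    exact Eq.trans (pv_phase2_proj _ _ _) (pv_phase2_char _ hnd2)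
  have hB : pvPhaseB (PySem.Dict.ofList training)
      = (⟨(PySem.Dict.ofList training : PySem.Dict Int (List (Int × Int × Int))).items.filterMap
            (fun p => if (pvUserStepB p.2).length ≤ 1 then none
                      else some (p.1, pvUserStepB p.2))⟩ : PySem.Dict Int (List (Int × Int × Int))) :=
    pv_phaseB_char _ hndTr
  have hdict : (pvPhase2A (pvPhase1A (PySem.Dict.ofList training))).1
      = pvPhaseB (PySem.Dict.ofList training) := by
    rw [h2, hB]
    congr 1
    rw [pv_map_filter_eq_filterMap pvUserStepA]
    simp only [pv_userStep_eq]
  have hndB : (pvPhaseB (PySem.Dict.ofList training)).keys.Nodup := by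
    rw [← hdict, h2]
    exact List.Nodup.sublist (List.Sublist.map _ List.filter_sublist) hnd2
  rw [hdict, pv_obs_eq _ hndB, pv_obs_eq _ hndTe]
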